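-- pv_equiv track=rewrite | github.com/LEES1605/MAIC | src/ui/widgets/index_status.py | _pick_asset
-- ===== SOURCE A (Python) =====
-- from typing import Any, Iterable, Optional
--
-- def _pick_asset(assets: list[dict], candidates: Iterable[str]) -> Optional[dict]:
--     # 정확 일치 우선, 없으면 *.zip 중 첫 번째
--     for name in candidates:
--         for a in assets:
--             if a.get("name") == name:
--                 return a
--     for a in assets:
--         if str(a.get("name", "")).lower().endswith(".zip"):
--             return a
--     return None
-- ===== SOURCE B (Python) =====
-- from typing import Any, Iterable, Optional
--
-- def _pick_asset(assets: list[dict], candidates: Iterable[str]) -> Optional[dict]: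
--     # Different algorithm: map each candidate name to its priority (first position),
--     # then ONE pass over assets keeping the asset whose name has the best (lowest)
--     # priority seen so far (strict '<' keeps the earliest asset on ties), while the
--     # same pass also records the first '*.zip' asset as fallback.
--     prio = {}
--     i = 0
--     for n in candidates:
--         if n not in prio:
--             prio[n] = i
--         i += 1
--     best = None        # (priority, asset)
--     first_zip = None
--     for a in assets:
--         r = prio.get(a.get("name"))
--         if r is not None and (best is None or r < best[0]):
--             best = (r, a)
--         if first_zip is None and str(a.get("name", "")).lower().endswith(".zip"):
--             first_zip = a
--     return best[1] if best is not None else first_zip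
-- ===== Notes on version B (the rewrite author's own statement) =====
-- stated objective: faster
-- what changed: Inverts the traversal: instead of scanning assets once per candidate, B maps candidates to priorities and makes a single pass over assets with an argmin accumulator (lowest candidate priority, earliest asset on ties), computing the first-.zip fallback in the same pass.
import Mathlib
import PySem

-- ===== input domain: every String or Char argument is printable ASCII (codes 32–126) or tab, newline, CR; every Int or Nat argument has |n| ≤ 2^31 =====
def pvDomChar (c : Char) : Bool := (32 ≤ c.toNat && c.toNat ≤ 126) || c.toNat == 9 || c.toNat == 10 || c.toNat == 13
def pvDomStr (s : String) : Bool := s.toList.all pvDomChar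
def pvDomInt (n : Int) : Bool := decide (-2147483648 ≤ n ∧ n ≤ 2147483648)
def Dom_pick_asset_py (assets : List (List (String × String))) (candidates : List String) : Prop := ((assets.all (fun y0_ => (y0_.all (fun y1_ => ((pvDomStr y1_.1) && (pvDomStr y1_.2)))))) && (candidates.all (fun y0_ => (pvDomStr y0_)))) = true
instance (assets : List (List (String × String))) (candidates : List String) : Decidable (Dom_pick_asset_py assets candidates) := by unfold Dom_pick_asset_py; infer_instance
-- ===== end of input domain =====

-- B inverts A's traversal: one pass mapping candidates to priorities, then one pass over assets
-- keeping the asset of lowest candidate priority (earliest asset on ties) and, in the same pass,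
-- the first '*.zip' fallback; B is asymptotically faster than A's nested scan.

-- ===== PORT A =====
-- a.get("name") == name  (None compares unequal to any string)
def pvNamePred (name : String) (a : List (String × String)) : Bool :=
  (PySem.Dict.mk a).get? "name" == some name

-- str(a.get("name", "")).lower().endswith(".zip")  (values are strings, so str() is the identity)
def pvZipPred (a : List (String × String)) : Bool :=
  PySem.Str.endswith (PySem.Str.lower ((PySem.Dict.mk a).getD "name" "")) ".zip"

def pick_asset_py (assets : List (List (String × String))) (candidates : List String) : Option (List (String × String)) :=
  -- for name in candidates: for a in assets: if a.get("name") == name: return a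
  match candidates.findSome? (fun name => assets.find? (pvNamePred name)) with
  | some a => some a
  | none =>
    -- for a in assets: if … .endswith(".zip"): return a
    match assets.find? pvZipPred with
    | some a => some a
    | none => none

-- ===== PORT B =====
-- prio = {}; i = 0; for n in candidates: (if n not in prio: prio[n] = i); i += 1
def pvPrio (candidates : List String) : PySem.Dict String Int :=
  (PySem.List.enumerate candidates 0).foldl
    (fun d p => if d.contains p.2 then d else d.insert p.2 p.1) PySem.Dict.empty

-- one loop body: update (best, first_zip) for asset a
def pvStepB (prio : PySem.Dict String Int)
    (st : Option (Int × List (String × String)) × Option (List (String × String)))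
    (a : List (String × String)) :
    Option (Int × List (String × String)) × Option (List (String × String)) :=
  -- r = prio.get(a.get("name")); if r is not None and (best is None or r < best[0]): best = (r, a)
  let best :=
    match (PySem.Dict.mk a).get? "name" with
    | none => st.1
    | some n =>
      match prio.get? n with
      | none => st.1
      | some r =>
        match st.1 with
        | none => some (r, a)
        | some (bk, b) => if r < bk then some (r, a) else some (bk, b)
  -- if first_zip is None and … .endswith(".zip"): first_zip = a
  let fz := if st.2.isNone && pvZipPred a then some a else st.2
  (best, fz)

def pick_asset_py_alt (assets : List (List (String × String))) (candidates : List String) : Option (List (String × String)) :=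
  let prio := pvPrio candidates
  let st := assets.foldl (pvStepB prio) (none, none)
  match st.1 with
  | some (_, a) => some a
  | none => st.2

-- ===== PRECONDITION & SPEC =====
def Spec_pick_asset_py (assets : List (List (String × String))) (candidates : List String) (out : Option (List (String × String))) : Prop := out = pick_asset_py_alt assets candidates
instance (assets : List (List (String × String))) (candidates : List String) (out : Option (List (String × String))) : Decidable (Spec_pick_asset_py assets candidates out) := by unfold Spec_pick_asset_py; infer_instance

-- ===== CLAIM (what is proved, stated in full; the proofs are below) =====
def Claim_equal_pick_asset_py : Prop := ∀ (assets : List (List (String × String))) (candidates : List String), Dom_pick_asset_py assets candidates → Spec_pick_asset_py assets candidates (pick_asset_py assets candidates)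

-- ===== LEMMAS AND PROOFS =====

-- abstract argmin step over Nat-valued ranks
def pvStepN {α : Type} (r : α → Option Nat) (b : Option (Nat × α)) (a : α) : Option (Nat × α) :=
  match r a with
  | none => b
  | some k =>
    match b with
    | none => some (k, a)
    | some (bk, bb) => if k < bk then some (k, a) else some (bk, bb)

-- the Int-valued best step B's fold actually performs
def pvStepI {α : Type} (r : α → Option Int) (b : Option (Int × α)) (a : α) : Option (Int × α) :=
  match r a with
  | none => b
  | some k =>
    match b with
    | none => some (k, a)
    | some (bk, bb) => if k < bk then some (k, a) else some (bk, bb)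

def pvZStep (z : Option (List (String × String))) (a : List (String × String)) :
    Option (List (String × String)) :=
  if z.isNone && pvZipPred a then some a else z

-- rank of an asset = position of its name among the candidates
def pvRankOf (cs : List String) (a : List (String × String)) : Option Nat :=
  match (PySem.Dict.mk a).get? "name" with
  | some m => PySem.List.index? cs m
  | none => none

theorem pvPrio_foldl_get (l : List String) :
    ∀ (s : Int) (d : PySem.Dict String Int) (n : String),
    ((PySem.List.enumerate l s).foldl
      (fun d p => if d.contains p.2 then d else d.insert p.2 p.1) d).get? n =
    (match d.get? n with
     | some v => some v
     | none => (PySem.List.index? l n).map (fun k => s + (k : Int))) := by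
  induction l with
  | nil =>
    intro s d n
    cases h : d.get? n <;> simp [PySem.List.enumerate_nil, h, PySem.List.index?_eq_idxOf?]
  | cons c cs ih =>
    intro s d n
    rw [PySem.List.enumerate_cons, List.foldl_cons]
    by_cases hc : d.contains c = true
    · rw [show (if d.contains (s, c).2 = true then d else d.insert (s, c).2 (s, c).1) = d by
        simp [hc]]
      rw [ih (s + 1) d n]
      by_cases hcn : c = n
      · subst hcn
        have hc' := hc
        rw [PySem.Dict.contains_eq_isSome_get?] at hc'
        rcases Option.isSome_iff_exists.mp hc' with ⟨v, hv⟩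
        simp [hv]
      · rw [PySem.List.index?_cons_of_ne cs hcn]
        cases h : d.get? n with
        | some v => simp [h]
        | none => cases hidx : PySem.List.index? cs n <;> simp [h, hidx] <;> omega
    · rw [show (if d.contains (s, c).2 = true then d
            else d.insert (s, c).2 (s, c).1) = d.insert c s by simp [hc]]
      rw [ih (s + 1) (d.insert c s) n]
      simp only [Bool.not_eq_true] at hc
      by_cases hcn : c = n
      · subst hcn
        have hnone : d.get? c = none := by
          rw [PySem.Dict.get?_eq_none_iff_contains]; simp [hc]
        rw [PySem.Dict.get?_insert_self, hnone, PySem.List.index?_cons_self c cs]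
        simp
      · rw [PySem.Dict.get?_insert_of_ne d s (Ne.symm hcn), PySem.List.index?_cons_of_ne cs hcn]
        cases h : d.get? n with
        | some v => simp [h]
        | none => cases hidx : PySem.List.index? cs n <;> simp [h, hidx] <;> omega

theorem pvPrio_get (cs : List String) (n : String) :
    (pvPrio cs).get? n = (PySem.List.index? cs n).map (fun k => (k : Int)) := by
  rw [pvPrio, pvPrio_foldl_get cs 0 PySem.Dict.empty n]
  simp [PySem.Dict.get?_empty]

-- B's name→priority lookup is the cast of pvRankOf
theorem pvLookup_eq (cs : List String) (a : List (String × String)) :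
    (match (PySem.Dict.mk a).get? "name" with
     | none => (none : Option Int)
     | some n => (pvPrio cs).get? n) = (pvRankOf cs a).map (fun k => (k : Int)) := by
  rw [pvRankOf]
  cases h : (PySem.Dict.mk a).get? "name" with
  | none => simp
  | some m => simp [pvPrio_get]

-- the combined fold splits into the two independent folds
theorem foldl_stepB_split (prio : PySem.Dict String Int)
    (assets : List (List (String × String))) :
    ∀ (st : Option (Int × List (String × String)) × Option (List (String × String))),
    assets.foldl (pvStepB prio) st =
      (assets.foldl (pvStepI (fun a => match (PySem.Dict.mk a).get? "name" with
                                       | none => none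
                                       | some n => prio.get? n)) st.1,
       assets.foldl pvZStep st.2) := by
  have hstep : ∀ st a, pvStepB prio st a =
      (pvStepI (fun a => match (PySem.Dict.mk a).get? "name" with
                         | none => none
                         | some n => prio.get? n) st.1 a, pvZStep st.2 a) := by
    intro st a
    rw [pvStepB, pvStepI, pvZStep]
    cases h : (PySem.Dict.mk a).get? "name" with
    | none => simp [h]
    | some n =>
      dsimp only
      cases prio.get? n with
      | none => rfl
      | some r =>
        rcases st.1 with _ | ⟨bk, b⟩ <;> rfl
  induction assets with
  | nil => intro st; rfl
  | cons a rest ih =>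
    intro st
    rw [List.foldl_cons, List.foldl_cons, List.foldl_cons, hstep, ih]

-- the zip fold, once it holds a value, keeps it …
theorem foldl_zstep_some (assets : List (List (String × String))) (x : List (String × String)) :
    assets.foldl pvZStep (some x) = some x := by
  induction assets with
  | nil => rfl
  | cons a rest ih => simpa [pvZStep] using ih

-- … and from none it finds the first .zip asset
theorem foldl_zstep_none (assets : List (List (String × String))) :
    assets.foldl pvZStep none = assets.find? pvZipPred := by
  induction assets with
  | nil => rfl
  | cons a rest ih =>
    rw [List.foldl_cons, List.find?]
    cases h : pvZipPred a with
    | false => simpa [pvZStep, h] using ih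
    | true => simp [pvZStep, h, foldl_zstep_some]

-- the Int fold is the cast image of the Nat fold
theorem foldl_stepI_cast {α : Type} (rN : α → Option Nat) (assets : List α) :
    ∀ (acc : Option (Nat × α)),
    assets.foldl (pvStepI (fun a => (rN a).map (fun k => (k : Int))))
        (acc.map (fun p => ((p.1 : Int), p.2))) =
      (assets.foldl (pvStepN rN) acc).map (fun p => ((p.1 : Int), p.2)) := by
  induction assets with
  | nil => intro acc; rfl
  | cons a rest ih =>
    intro acc
    rw [List.foldl_cons, List.foldl_cons]
    cases hr : rN a with
    | none => simpa [pvStepI, pvStepN, hr] using ih acc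
    | some k =>
      cases acc with
      | none => simpa [pvStepI, pvStepN, hr] using ih (some (k, a))
      | some p =>
        rcases p with ⟨bk, bb⟩
        by_cases hlt : k < bk
        · have : (k : Int) < (bk : Int) := by exact_mod_cast hlt
          simpa [pvStepI, pvStepN, hr, hlt, this] using ih (some (k, a))
        · have : ¬ ((k : Int) < (bk : Int)) := by exact_mod_cast hlt
          simpa [pvStepI, pvStepN, hr, hlt, this] using ih (some (bk, bb))

-- rank-0 is final: nothing beats it
theorem foldl_stepN_zero {α : Type} (r : α → Option Nat) (assets : List α) (a : α) :
    assets.foldl (pvStepN r) (some (0, a)) = some (0, a) := by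
  induction assets with
  | nil => rfl
  | cons x rest ih =>
    rw [List.foldl_cons]
    cases hr : r x with
    | none => simpa [pvStepN, hr] using ih
    | some k => simpa [pvStepN, hr, Nat.not_lt_zero] using ih

-- if every rank is none the fold is the identity
theorem foldl_stepN_none {α : Type} (r : α → Option Nat) (assets : List α)
    (h : ∀ x ∈ assets, r x = none) : ∀ acc, assets.foldl (pvStepN r) acc = acc := by
  induction assets with
  | nil => intro acc; rfl
  | cons x rest ih =>
    intro acc
    rw [List.foldl_cons]
    have hx : r x = none := h x (by simp)
    rw [show pvStepN r acc x = acc by simp [pvStepN, hx]]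
    exact ih (fun y hy => h y (by simp [hy])) acc

-- if some asset matches q (rank 0) the fold lands on the FIRST such asset
theorem foldl_stepN_found {α : Type} (q : α → Bool) (r r' : α → Option Nat)
    (hr' : ∀ x, r' x = if q x then some 0 else (r x).map (· + 1)) :
    ∀ (assets : List α) (acc : Option (Nat × α)),
    (∀ k b, acc = some (k, b) → 0 < k) →
    ∀ a, assets.find? q = some a →
    assets.foldl (pvStepN r') acc = some (0, a) := by
  intro assets
  induction assets with
  | nil => intro acc _ a h; simp at h
  | cons x rest ih =>
    intro acc hacc a hfind
    rw [List.foldl_cons]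
    rw [List.find?] at hfind
    cases hq : q x with
    | true =>
      rw [hq] at hfind
      injection hfind with hfind; subst hfind
      have hx : r' x = some 0 := by rw [hr' x, hq]; simp
      cases hc : acc with
      | none => rw [show pvStepN r' none x = some (0, x) by simp [pvStepN, hx]]
                exact foldl_stepN_zero r' rest x
      | some p =>
        rcases p with ⟨bk, bb⟩
        have hpos : 0 < bk := hacc bk bb hc
        rw [show pvStepN r' (some (bk, bb)) x = some (0, x) by
          simp [pvStepN, hx, hpos]]
        exact foldl_stepN_zero r' rest x
    | false =>
      rw [hq] at hfind
      have hx : r' x = (r x).map (· + 1) := by rw [hr' x, hq]; simp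
      refine ih (pvStepN r' acc x) ?_ a hfind
      intro k b hkb
      cases hrx : r x with
      | none =>
        rw [show pvStepN r' acc x = acc by simp [pvStepN, hx, hrx]] at hkb
        exact hacc k b hkb
      | some m =>
        have hx' : r' x = some (m + 1) := by rw [hx, hrx]; rfl
        cases hc : acc with
        | none =>
          rw [hc] at hkb
          rw [show pvStepN r' none x = some (m + 1, x) by simp [pvStepN, hx']] at hkb
          injection hkb with hkb
          cases hkb; omega
        | some p =>
          rcases p with ⟨bk, bb⟩
          have hpos : 0 < bk := hacc bk bb hc
          rw [hc] at hkb
          by_cases hlt : m + 1 < bk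
          · rw [show pvStepN r' (some (bk, bb)) x = some (m + 1, x) by
              simp [pvStepN, hx', hlt]] at hkb
            injection hkb with hkb; cases hkb; omega
          · rw [show pvStepN r' (some (bk, bb)) x = some (bk, bb) by
              simp [pvStepN, hx', hlt]] at hkb
            injection hkb with hkb; cases hkb; omega

-- if no asset matches q, all ranks shift by one and the fold commutes with the shift
theorem foldl_stepN_shift {α : Type} (q : α → Bool) (r r' : α → Option Nat)
    (hr' : ∀ x, r' x = if q x then some 0 else (r x).map (· + 1)) :
    ∀ (assets : List α), (∀ x ∈ assets, q x = false) →
    ∀ (acc : Option (Nat × α)),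
    assets.foldl (pvStepN r') (acc.map (fun p => (p.1 + 1, p.2))) =
      (assets.foldl (pvStepN r) acc).map (fun p => (p.1 + 1, p.2)) := by
  intro assets
  induction assets with
  | nil => intro _ acc; rfl
  | cons x rest ih =>
    intro hq acc
    rw [List.foldl_cons, List.foldl_cons]
    have hqx : q x = false := hq x (by simp)
    have hrest : ∀ y ∈ rest, q y = false := fun y hy => hq y (by simp [hy])
    have hx : r' x = (r x).map (· + 1) := by rw [hr' x, hqx]; simp
    cases hrx : r x with
    | none => simpa [pvStepN, hx, hrx] using ih hrest acc
    | some k =>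
      have hx' : r' x = some (k + 1) := by rw [hx, hrx]; rfl
      cases acc with
      | none => simpa [pvStepN, hx', hrx] using ih hrest (some (k, x))
      | some p =>
        rcases p with ⟨bk, bb⟩
        by_cases hlt : k < bk
        · simpa [pvStepN, hx', hrx, hlt, Nat.add_lt_add_iff_right] using ih hrest (some (k, x))
        · simpa [pvStepN, hx', hrx, hlt, Nat.add_lt_add_iff_right] using ih hrest (some (bk, bb))

-- pvRankOf on c :: cs: rank 0 exactly on the assets A's inner scan would accept for c
theorem pvRankOf_cons (c : String) (cs : List String) (x : List (String × String)) :
    pvRankOf (c :: cs) x =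
      if pvNamePred c x then some 0 else (pvRankOf cs x).map (· + 1) := by
  rw [pvRankOf, pvRankOf, pvNamePred]
  cases h : (PySem.Dict.mk x).get? "name" with
  | none => simp
  | some m =>
    by_cases hmc : c = m
    · subst hmc
      have h0 := PySem.List.index?_cons_self c cs
      rw [PySem.List.index?_eq_idxOf?] at h0
      simp [h0]
    · have hne := PySem.List.index?_cons_of_ne cs hmc
      rw [PySem.List.index?_eq_idxOf?, PySem.List.index?_eq_idxOf?] at hne
      simp [hne, Ne.symm hmc]

-- MAIN: A's nested scan is the argmin the single pass computes
theorem main_argmin (cs : List String) :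
    ∀ (assets : List (List (String × String))),
    cs.findSome? (fun n => assets.find? (pvNamePred n)) =
      (assets.foldl (pvStepN (pvRankOf cs)) none).map Prod.snd := by
  induction cs with
  | nil =>
    intro assets
    rw [foldl_stepN_none (pvRankOf []) assets
      (fun x _ => by rw [pvRankOf]; cases (PySem.Dict.mk x).get? "name" <;>
        simp [PySem.List.index?_eq_idxOf?])]
    simp
  | cons c cs ih =>
    intro assets
    rw [List.findSome?_cons]
    cases hfind : assets.find? (pvNamePred c) with
    | some a =>
      rw [foldl_stepN_found (pvNamePred c) (pvRankOf cs) (pvRankOf (c :: cs))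
        (pvRankOf_cons c cs) assets none (by intro k b h; simp at h) a hfind]
      rfl
    | none =>
      have hq : ∀ x ∈ assets, pvNamePred c x = false := by
        intro x hx
        have := List.find?_eq_none.mp hfind x hx
        simpa using this
      have := foldl_stepN_shift (pvNamePred c) (pvRankOf cs) (pvRankOf (c :: cs))
        (pvRankOf_cons c cs) assets hq none
      simp only [Option.map_none] at this
      rw [this, ih assets]
      cases assets.foldl (pvStepN (pvRankOf cs)) none with
      | none => rfl
      | some p => rfl

-- ===== VERDICT (by name: the statement is the Claim_ definition above) =====
theorem pick_asset_py_spec : Claim_equal_pick_asset_py := by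
  intro assets cs _
  unfold Spec_pick_asset_py
  show pick_asset_py assets cs = pick_asset_py_alt assets cs
  simp only [pick_asset_py, pick_asset_py_alt]
  rw [foldl_stepB_split]
  have hcast : (fun a => match (PySem.Dict.mk a).get? "name" with
                         | none => (none : Option Int)
                         | some n => (pvPrio cs).get? n) =
      (fun a => (pvRankOf cs a).map (fun k => (k : Int))) := by
    funext a; exact pvLookup_eq cs a
  rw [hcast]
  have := foldl_stepI_cast (pvRankOf cs) assets none
  simp only [Option.map_none] at this
  rw [this, foldl_zstep_none, main_argmin cs assets]
  cases assets.foldl (pvStepN (pvRankOf cs)) none with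
  | none => cases assets.find? pvZipPred <;> rfl
  | some p => rfl
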